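-- pv_equiv track=rewrite | github.com/Lob-Corp/Legacy | src/libraries/mutil.py | decline
-- ===== SOURCE A (Python) =====
-- def decline(case: str, s: str) -> str:
--     """
--     A direct translation of the OCaml 'decline' logic.
--     This seems to be a legacy format for handling grammatical cases in names.
--     Example: 'n' for nominative case.
--     """
--     # This complex logic is preserved as it is highly domain-specific.
--     # In a real-world scenario, this might be re-evaluated for a simpler approach.
--     def colon_to_at(text: str) -> str:
--         # A simplified Python version of the complex recursive logic
--         # It seems to transform "Name:variant" into "Name@(variant)"
--         parts = []
--         current_part = ""
--         for char in text:
--             if char in (' ', '<', '/'):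
--                 if current_part:
--                     parts.append(current_part.replace(':', '@(', 1) + ')')
--                     current_part = ""
--                 parts.append(char)
--             else:
--                 current_part += char
--         if current_part:
--              parts.append(current_part.replace(':', '@(', 1) + ')')
--         return "".join(parts)
--
--     if ':' not in s:
--         return s
--     return f"@(@({case}){colon_to_at(s)})"
-- ===== SOURCE B (Python) =====
-- import re
--
-- def decline(case: str, s: str) -> str:
--     if ':' not in s:
--         return s
--     body = re.sub(r'[^ </]+', lambda m: m.group().replace(':', '@(', 1) + ')', s)
--     return f"@(@({case}){body})"
-- ===== Notes on version B (the rewrite author's own statement) =====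
-- stated objective: idiomatic
-- what changed: Replaces the explicit char-by-char accumulator/tokenizer loop with a single regex substitution (re.sub over maximal non-delimiter runs) that applies the first-colon-to-'@(' plus trailing ')' transform in one pass.
import Mathlib
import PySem

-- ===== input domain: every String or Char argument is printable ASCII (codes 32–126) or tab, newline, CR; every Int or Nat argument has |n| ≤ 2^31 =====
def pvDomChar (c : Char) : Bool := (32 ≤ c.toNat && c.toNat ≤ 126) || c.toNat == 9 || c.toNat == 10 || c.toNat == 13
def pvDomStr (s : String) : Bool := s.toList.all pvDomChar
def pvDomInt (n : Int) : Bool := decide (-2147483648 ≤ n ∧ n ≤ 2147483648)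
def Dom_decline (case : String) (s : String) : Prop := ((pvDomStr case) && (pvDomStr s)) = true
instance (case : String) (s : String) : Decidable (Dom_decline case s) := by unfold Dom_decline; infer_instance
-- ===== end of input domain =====

-- B replaces A's explicit accumulator/tokenizer loop by a single regex-style
-- substitution over maximal non-delimiter runs (objective: idiomatic; same cost).

-- helpers shared by both ports (both Pythons test the same delimiters and use the
-- same str.replace(':', '@(', 1) call):
def pvDelim (c : Char) : Bool := c = ' ' || c = '<' || c = '/'
-- text.replace(':', '@(', 1) on the character list (exact: replaces first ':' only)
def pvRepl1 : List Char → List Char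
  | [] => []
  | c :: t => if c = ':' then '@' :: '(' :: t ++ [] else c :: pvRepl1 t
-- current_part.replace(':', '@(', 1) + ')'
def pvTrans (l : List Char) : List Char := pvRepl1 l ++ [')']

-- ===== PORT A =====
-- the for-loop of colon_to_at: state = (parts, current_part)
def pvLoopA : List Char → List Char → List (List Char) → List (List Char)
  | [], cur, parts => if cur = [] then parts else parts ++ [pvTrans cur]
  | c :: t, cur, parts =>
    if pvDelim c then
      pvLoopA t [] ((if cur = [] then parts else parts ++ [pvTrans cur]) ++ [[c]])
    else
      pvLoopA t (cur ++ [c]) parts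

def decline (case : String) (s : String) : String :=
  if ':' ∈ s.toList then
    String.mk ("@(@(".toList ++ case.toList ++ ")".toList ++ (pvLoopA s.toList [] []).flatten ++ ")".toList)
  else s

-- ===== PORT B =====
-- re.sub(r'[^ </]+', λ m, pvTrans m, s): walk the text, copying delimiters and
-- transforming each maximal non-delimiter run in one step
def pvSubB : List Char → List Char
  | [] => []
  | c :: t =>
    if pvDelim c then c :: pvSubB t
    else pvTrans (c :: t.takeWhile (fun d => !pvDelim d)) ++ pvSubB (t.dropWhile (fun d => !pvDelim d))
termination_by l => l.length
decreasing_by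
  · simp
  · exact Nat.lt_succ_of_le (List.length_dropWhile_le _ _)

def decline_alt (case : String) (s : String) : String :=
  if ':' ∈ s.toList then
    String.mk ("@(@(".toList ++ case.toList ++ [')'] ++ pvSubB s.toList ++ [')'])
  else s

-- ===== PRECONDITION & SPEC =====
def Spec_decline (case : String) (s : String) (out : String) : Prop := out = decline_alt case s
instance (case : String) (s : String) (out : String) : Decidable (Spec_decline case s out) := by unfold Spec_decline; infer_instance

-- ===== CLAIM (what is proved, stated in full; the proofs are below) =====
def Claim_equal_decline : Prop := ∀ (case : String) (s : String), Dom_decline case s → Spec_decline case s (decline case s)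

-- ===== LEMMAS AND PROOFS =====

-- flattening A's loop result splits off the already-collected parts
theorem pvLoopA_parts (l : List Char) : ∀ (cur : List Char) (parts : List (List Char)),
    (pvLoopA l cur parts).flatten = parts.flatten ++ (pvLoopA l cur []).flatten := by
  induction l with
  | nil =>
    intro cur parts
    by_cases h : cur = [] <;> simp [pvLoopA, h]
  | cons c t ih =>
    intro cur parts
    by_cases hd : pvDelim c
    · have e : ∀ p : List (List Char), pvLoopA (c :: t) cur p =
          pvLoopA t [] ((if cur = [] then p else p ++ [pvTrans cur]) ++ [[c]]) := by
        intro p; simp [pvLoopA, hd]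
      rw [e, e]
      by_cases h : cur = [] <;>
        simp [h, ih [] [[c]], ih [] [pvTrans cur, [c]], ih [] (parts ++ [[c]]),
          ih [] (parts ++ [pvTrans cur, [c]]), List.append_assoc]
    · have e : ∀ p : List (List Char), pvLoopA (c :: t) cur p = pvLoopA t (cur ++ [c]) p := by
        intro p; simp [pvLoopA, hd]
      rw [e, e]
      exact ih (cur ++ [c]) parts

-- B's walk, expressed by its first maximal run
theorem pvSubB_run (t : List Char) :
    pvSubB t = (if t.takeWhile (fun d => !pvDelim d) = [] then []
                else pvTrans (t.takeWhile (fun d => !pvDelim d))) ++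
               pvSubB (t.dropWhile (fun d => !pvDelim d)) := by
  cases t with
  | nil => simp [pvSubB]
  | cons c t' =>
    by_cases hd : pvDelim c
    · simp [pvSubB, hd, List.takeWhile_cons, List.dropWhile_cons]
    · simp [pvSubB, hd, List.takeWhile_cons, List.dropWhile_cons]

-- the central invariant: A's loop from state (cur, []) equals B's run-based walk
theorem pvLoop_eq_sub (l : List Char) : ∀ (cur : List Char),
    (pvLoopA l cur []).flatten =
      (if cur ++ l.takeWhile (fun d => !pvDelim d) = [] then []
       else pvTrans (cur ++ l.takeWhile (fun d => !pvDelim d))) ++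
      pvSubB (l.dropWhile (fun d => !pvDelim d)) := by
  induction l with
  | nil =>
    intro cur
    by_cases h : cur = [] <;> simp [pvLoopA, pvSubB, h]
  | cons c t ih =>
    intro cur
    by_cases hd : pvDelim c
    · have e : pvLoopA (c :: t) cur [] =
          pvLoopA t [] ((if cur = [] then [] else [pvTrans cur]) ++ [[c]]) := by
        simp [pvLoopA, hd]
      rw [e, pvLoopA_parts t []]
      have h2 := ih []
      simp only [List.nil_append] at h2
      rw [h2, ← pvSubB_run t]
      by_cases h : cur = [] <;>
        simp [h, hd, List.takeWhile_cons, List.dropWhile_cons, pvSubB]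
    · have e : pvLoopA (c :: t) cur [] = pvLoopA t (cur ++ [c]) [] := by
        simp [pvLoopA, hd]
      rw [e, ih (cur ++ [c])]
      simp [List.takeWhile_cons, List.dropWhile_cons, hd, List.append_assoc]

theorem pvLoopA_eq_pvSubB (l : List Char) : (pvLoopA l [] []).flatten = pvSubB l := by
  rw [pvLoop_eq_sub l [], List.nil_append, ← pvSubB_run]

-- ===== VERDICT (by name: the statement is the Claim_ definition above) =====
theorem decline_spec : Claim_equal_decline := by
  intro case s _
  unfold Spec_decline decline decline_alt
  by_cases h : ':' ∈ s.toList
  · simp [h, pvLoopA_eq_pvSubB]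
  · simp [h]
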